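-- pv_equiv track=rewrite | github.com/spw6893-ui/newOne | AlphaQCM/data_collection/prepare_alphagen_training_data.py | _canonical_order
-- ===== SOURCE A (Python) =====
-- from typing import Iterable, Optional, Sequence
--
-- def _canonical_order(cols: Iterable[str]) -> list[str]:
--     """
--     给输出列一个稳定顺序，便于 diff/调试，也便于训练端做一致的 FeatureType 映射。
--     """
--     cols = list(dict.fromkeys([str(c).strip() for c in cols if str(c).strip()]))
--     colset = set(cols)
--
--     core = [c for c in ("symbol", "feature_time", "split", "open", "high", "low", "close", "volume", "volume_clean", "vwap") if c in colset]
--     labels = sorted([c for c in cols if c.startswith("y_")])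
--     rest = [c for c in cols if (c not in set(core)) and (c not in set(labels))]
--     rest_sorted = sorted(rest)
--     return core + rest_sorted + labels
-- ===== SOURCE B (Python) =====
-- def _canonical_order(cols):
--     core = ("symbol", "feature_time", "split", "open", "high", "low", "close", "volume", "volume_clean", "vwap")
--     core_index = {name: i for i, name in enumerate(core)}
--     uniq = list(dict.fromkeys([str(c).strip() for c in cols if str(c).strip()]))
--
--     def key(c):
--         if c in core_index:
--             return (core_index[c], "")
--         if c.startswith("y_"):
--             return (11, c)
--         return (10, c)
--
--     return sorted(uniq, key=key)
-- ===== Notes on version B (the rewrite author's own statement) =====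
-- stated objective: alternative
-- what changed: A builds and concatenates three buckets (core filter, sorted rest, sorted labels); B does one sorted() over the deduplicated columns with a lexicographic (bucket, name) key from a precomputed core-index dict, removing the per-element set memberships and the separate concatenation.
import Mathlib
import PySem

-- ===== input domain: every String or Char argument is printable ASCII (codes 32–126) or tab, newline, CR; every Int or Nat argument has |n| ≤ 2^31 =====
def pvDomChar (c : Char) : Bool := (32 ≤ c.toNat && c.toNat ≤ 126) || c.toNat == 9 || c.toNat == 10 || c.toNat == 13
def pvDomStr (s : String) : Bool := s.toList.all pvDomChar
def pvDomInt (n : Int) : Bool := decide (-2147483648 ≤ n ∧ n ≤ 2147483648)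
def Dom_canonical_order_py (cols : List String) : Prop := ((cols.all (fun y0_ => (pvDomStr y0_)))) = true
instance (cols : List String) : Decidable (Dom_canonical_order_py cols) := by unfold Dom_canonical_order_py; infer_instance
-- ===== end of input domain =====

-- B replaces A's three separately built and concatenated buckets (core filter, sorted rest, sorted labels)
-- by ONE keyed sort of the deduplicated columns under a lexicographic (bucket, name) key; objective: alternative.

-- the fixed priority tuple of A (and of B's index dict)
def pvCoreNames : List String :=
  ["symbol", "feature_time", "split", "open", "high", "low", "close", "volume", "volume_clean", "vwap"]

-- ===== PORT A =====
def canonical_order_py (cols : List String) : List String :=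
  let cols2 := PySem.List.dedup ((cols.filter (fun c => PySem.Str.strip c != "")).map PySem.Str.strip)
  let colset : PySem.Set String := PySem.Set.ofList cols2
  let core := pvCoreNames.filter (fun c => PySem.Set.contains colset c)
  let labels := PySem.List.sorted (cols2.filter (fun c => PySem.Str.startswith c "y_")) (fun c => c)
  let rest := cols2.filter (fun c =>
    !(PySem.Set.contains (PySem.Set.ofList core) c) && !(PySem.Set.contains (PySem.Set.ofList labels) c))
  let rest_sorted := PySem.List.sorted rest (fun c => c)
  core ++ rest_sorted ++ labels

-- ===== PORT B =====
-- core_index = {name: i for i, name in enumerate(core)}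
def pvCoreIndex : PySem.Dict String Int :=
  (PySem.List.enumerate pvCoreNames).foldl (fun d p => d.insert p.2 p.1) PySem.Dict.empty

-- the Python tuple key (bucket, name); Python tuple comparison is lexicographic = Lex (Int × String)
def pvKey (c : String) : Lex (Int × String) :=
  match PySem.Dict.get? pvCoreIndex c with
  | some i => toLex (i, "")
  | none => if PySem.Str.startswith c "y_" then toLex (11, c) else toLex (10, c)

def canonical_order_py_alt (cols : List String) : List String :=
  let uniq := PySem.List.dedup ((cols.filter (fun c => PySem.Str.strip c != "")).map PySem.Str.strip)
  PySem.List.sorted uniq pvKey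

-- ===== PRECONDITION & SPEC =====
def Spec_canonical_order_py (cols : List String) (out : List String) : Prop := out = canonical_order_py_alt cols
instance (cols : List String) (out : List String) : Decidable (Spec_canonical_order_py cols out) := by unfold Spec_canonical_order_py; infer_instance

-- ===== CLAIM (what is proved, stated in full; the proofs are below) =====
def Claim_equal_canonical_order_py : Prop := ∀ (cols : List String), Dom_canonical_order_py cols → Spec_canonical_order_py cols (canonical_order_py cols)

-- ===== LEMMAS AND PROOFS =====

theorem pvKey_not_core (c : String) (h : c ∉ pvCoreNames) :
    pvKey c = if PySem.Str.startswith c "y_" then toLex (11, c) else toLex (10, c) := by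
  have hg : PySem.Dict.get? pvCoreIndex c = none := by
    rw [PySem.Dict.get?_eq_none_iff_not_mem_keys]
    simpa [show pvCoreIndex.keys = pvCoreNames from by decide] using h
  simp [pvKey, hg]

theorem pvKey_core_pairwise : List.Pairwise (fun a b => pvKey a < pvKey b) pvCoreNames := by decide

theorem pvKey_core_lt (c : String) (h : c ∈ pvCoreNames) (s : String) :
    pvKey c < toLex ((10 : Int), s) ∧ pvKey c < toLex ((11 : Int), s) := by
  fin_cases h <;> exact ⟨Prod.Lex.left _ _ (by decide), Prod.Lex.left _ _ (by decide)⟩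

theorem pvCore_not_y (c : String) (h : c ∈ pvCoreNames) : PySem.Str.startswith c "y_" = false := by
  fin_cases h <;> decide

-- the heart: for any duplicate-free cleaned column list u, A's three-bucket concatenation
-- is exactly sorted(u, key=pvKey)
theorem pv_main (u core labels rest : List String) (hu : u.Nodup)
    (hcore : core = pvCoreNames.filter (fun c => PySem.Set.contains (PySem.Set.ofList u) c))
    (hlabels : labels = PySem.List.sorted (u.filter (fun c => PySem.Str.startswith c "y_")) (fun c => c))
    (hrest : rest = u.filter (fun c =>
      !(PySem.Set.contains (PySem.Set.ofList core) c) && !(PySem.Set.contains (PySem.Set.ofList labels) c))) :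
    PySem.List.sorted u pvKey = core ++ PySem.List.sorted rest (fun c => c) ++ labels := by
  have hmcore : ∀ c, c ∈ core ↔ c ∈ pvCoreNames ∧ c ∈ u := by
    subst hcore
    intro c
    simp [List.mem_filter, PySem.Set.mem_ofList]
  have hmlabels : ∀ c, c ∈ labels ↔ c ∈ u ∧ PySem.Str.startswith c "y_" = true := by
    subst hlabels
    intro c
    simp [PySem.List.mem_sorted, List.mem_filter]
  have hmrest : ∀ c, c ∈ rest ↔ c ∈ u ∧ c ∉ core ∧ c ∉ labels := by
    subst hrest
    intro c
    simp [List.mem_filter, PySem.Set.mem_ofList]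
  have hrest_notcore : ∀ c ∈ rest, c ∉ pvCoreNames := by
    intro c hc hmem
    rcases (hmrest c).1 hc with ⟨hcu, hnc, -⟩
    exact hnc ((hmcore c).2 ⟨hmem, hcu⟩)
  have hrest_noty : ∀ c ∈ rest, PySem.Str.startswith c "y_" = false := by
    intro c hc
    rcases (hmrest c).1 hc with ⟨hcu, -, hnl⟩
    cases hy : PySem.Str.startswith c "y_" with
    | false => rfl
    | true => exact absurd ((hmlabels c).2 ⟨hcu, hy⟩) hnl
  have hlab_notcore : ∀ c ∈ labels, c ∉ pvCoreNames := by
    intro c hc hmem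
    have h1 := ((hmlabels c).1 hc).2
    rw [pvCore_not_y c hmem] at h1
    exact Bool.false_ne_true h1
  have hkrest : ∀ c ∈ rest, pvKey c = toLex ((10 : Int), c) := by
    intro c hc
    rw [pvKey_not_core c (hrest_notcore c hc), hrest_noty c hc]
    simp
  have hklab : ∀ c ∈ labels, pvKey c = toLex ((11 : Int), c) := by
    intro c hc
    rw [pvKey_not_core c (hlab_notcore c hc), ((hmlabels c).1 hc).2]
    simp
  -- the three blocks
  set mid := PySem.List.sorted rest (fun c => c) with hmid
  have hmmid : ∀ c, c ∈ mid ↔ c ∈ rest := fun c => PySem.List.mem_sorted rest _ false c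
  have hpw_core : List.Pairwise (fun a b => pvKey a < pvKey b) core := by
    rw [hcore]; exact pvKey_core_pairwise.filter _
  have hnd_rest : rest.Nodup := by rw [hrest]; exact hu.filter _
  have hnd_mid : mid.Nodup := ((PySem.List.sorted_perm rest (fun c => c) false).nodup_iff).mpr hnd_rest
  have hpw_mid : List.Pairwise (fun a b => pvKey a < pvKey b) mid := by
    refine ((PySem.List.sorted_pairwise rest (fun c => c)).and hnd_mid).imp_of_mem ?_
    intro a b ha hb h
    rw [hkrest a ((hmmid a).1 ha), hkrest b ((hmmid b).1 hb)]
    exact Prod.Lex.right _ (lt_of_le_of_ne h.1 h.2)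
  have hnd_flab : (u.filter (fun c => PySem.Str.startswith c "y_")).Nodup := hu.filter _
  have hnd_lab : labels.Nodup := by
    rw [hlabels]
    exact ((PySem.List.sorted_perm _ (fun c => c) false).nodup_iff).mpr hnd_flab
  have hpw_lab : List.Pairwise (fun a b => pvKey a < pvKey b) labels := by
    have h1 : List.Pairwise (fun a b : String => a ≤ b) labels := by
      rw [hlabels]; exact PySem.List.sorted_pairwise _ _
    refine (h1.and hnd_lab).imp_of_mem ?_
    intro a b ha hb h
    rw [hklab a ha, hklab b hb]
    exact Prod.Lex.right _ (lt_of_le_of_ne h.1 h.2)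
  have hcross1 : ∀ a ∈ core, ∀ b ∈ mid, pvKey a < pvKey b := by
    intro a ha b hb
    rw [hkrest b ((hmmid b).1 hb)]
    exact (pvKey_core_lt a (((hmcore a).1 ha).1) b).1
  have hcross2 : ∀ a ∈ core, ∀ b ∈ labels, pvKey a < pvKey b := by
    intro a ha b hb
    rw [hklab b hb]
    exact (pvKey_core_lt a (((hmcore a).1 ha).1) b).2
  have hcross3 : ∀ a ∈ mid, ∀ b ∈ labels, pvKey a < pvKey b := by
    intro a ha b hb
    rw [hkrest a ((hmmid a).1 ha), hklab b hb]
    exact Prod.Lex.left _ _ (by norm_num)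
  have hpw : List.Pairwise (fun a b => pvKey a < pvKey b) (core ++ mid ++ labels) := by
    rw [List.pairwise_append]
    refine ⟨?_, hpw_lab, ?_⟩
    · rw [List.pairwise_append]
      exact ⟨hpw_core, hpw_mid, hcross1⟩
    · intro a ha b hb
      rcases List.mem_append.1 ha with h | h
      · exact hcross2 a h b hb
      · exact hcross3 a h b hb
  have hnd : (core ++ mid ++ labels).Nodup := by
    refine hpw.imp ?_
    intro a b h heq
    subst heq
    exact absurd h (lt_irrefl (pvKey a))
  have hperm : (core ++ mid ++ labels).Perm u := by
    refine (List.perm_ext_iff_of_nodup hnd hu).2 ?_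
    intro a
    constructor
    · intro ha
      rcases List.mem_append.1 ha with h | h
      · rcases List.mem_append.1 h with h' | h'
        · exact ((hmcore a).1 h').2
        · exact ((hmrest a).1 ((hmmid a).1 h')).1
      · exact ((hmlabels a).1 h).1
    · intro hau
      by_cases hac : a ∈ pvCoreNames
      · exact List.mem_append.2 (Or.inl (List.mem_append.2 (Or.inl ((hmcore a).2 ⟨hac, hau⟩))))
      · by_cases hay : PySem.Str.startswith a "y_" = true
        · exact List.mem_append.2 (Or.inr ((hmlabels a).2 ⟨hau, hay⟩))
        · refine List.mem_append.2 (Or.inl (List.mem_append.2 (Or.inr ((hmmid a).2 ?_))))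
          refine (hmrest a).2 ⟨hau, fun h => hac ((hmcore a).1 h).1, fun h => hay ((hmlabels a).1 h).2⟩
  exact PySem.List.sorted_eq_of_perm_of_pairwise_lt u (core ++ mid ++ labels) pvKey hperm hpw

-- ===== VERDICT (by name: the statement is the Claim_ definition above) =====
theorem canonical_order_py_spec : Claim_equal_canonical_order_py := by
  intro cols _
  unfold Spec_canonical_order_py canonical_order_py canonical_order_py_alt
  exact (pv_main _ _ _ _ (PySem.List.nodup_dedup _) rfl rfl rfl).symm
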